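-- pv_equiv track=rewrite | github.com/shivashankarpala/python-newbie | basic/pascal-triangle.py | lengthiest
-- ===== SOURCE A (Python) =====
-- def lengthiest(lst):
--
--     largest = len(str(lst[0]))
--     k = 0
--     for i in range(len(lst)):
--         if len(str(lst[i])) > largest:
--             largest = len(str(lst[i]))
--             k = i
--     return k, largest
-- ===== SOURCE B (Python) =====
-- def lengthiest(lst):
--     lengths = [len(str(x)) for x in lst]
--     largest = max(lengths)
--     k = lengths.index(largest)
--     return k, largest
-- ===== Notes on version B (the rewrite author's own statement) =====
-- stated objective: simpler
-- what changed: Replaces the interleaved running-max-and-index scan over indices with a build-table-then-query decomposition: map to a list of string lengths, then take max() and .index() of it.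
import Mathlib
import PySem

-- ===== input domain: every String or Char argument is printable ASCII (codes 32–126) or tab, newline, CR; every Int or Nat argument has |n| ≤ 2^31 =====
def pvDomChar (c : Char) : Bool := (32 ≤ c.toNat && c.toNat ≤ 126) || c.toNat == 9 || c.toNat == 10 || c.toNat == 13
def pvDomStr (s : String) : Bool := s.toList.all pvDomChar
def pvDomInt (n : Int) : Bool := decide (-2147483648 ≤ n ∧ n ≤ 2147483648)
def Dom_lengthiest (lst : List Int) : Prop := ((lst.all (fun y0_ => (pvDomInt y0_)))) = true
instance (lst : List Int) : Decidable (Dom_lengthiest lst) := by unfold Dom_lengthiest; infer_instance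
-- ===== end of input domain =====

-- B replaces A's interleaved running-max-and-index scan by a build-table-then-query
-- decomposition (map to string lengths, then max and first index); same cost, simpler.

-- ===== PORT A =====
-- literal port of A: largest = len(str(lst[0])); k = 0; for i in range(len(lst)): …
def lengthiest (lst : List Int) : Int × Int :=
  match PySem.List.pyGet? lst 0 with
  | none => (0, 0)  -- IndexError in Python; excluded by Pre_lengthiest
  | some x0 =>
    let st :=
      (PySem.List.pyRange 0 lst.length 1).foldl
        (fun (st : Int × Int) i =>
          if PySem.Str.len (PySem.Int.toStr (PySem.List.pyGetD lst i 0)) > st.1 then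
            (PySem.Str.len (PySem.Int.toStr (PySem.List.pyGetD lst i 0)), i)
          else st)
        (PySem.Str.len (PySem.Int.toStr x0), 0)
    (st.2, st.1)

-- ===== PORT B =====
-- literal port of B: lengths = [len(str(x)) for x in lst]; largest = max(lengths);
-- k = lengths.index(largest); return k, largest
def lengthiest_alt (lst : List Int) : Int × Int :=
  let lengths := lst.map (fun x => PySem.Str.len (PySem.Int.toStr x))
  match PySem.List.max? lengths (fun y => y) with
  | none => (0, 0)  -- ValueError in Python (max of empty sequence); excluded by Pre_lengthiest
  | some largest =>
    match PySem.List.index? lengths largest with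
    | none => (0, 0)  -- unreachable: the max is a member of lengths
    | some k => ((k : Int), largest)

-- ===== PRECONDITION & SPEC =====
-- A raises IndexError on the empty list (lst[0]); B raises ValueError there (max of empty).
def Pre_lengthiest (lst : List Int) : Prop := lst ≠ []
instance (lst : List Int) : Decidable (Pre_lengthiest lst) := by unfold Pre_lengthiest; infer_instance
def pvWitness_lengthiest : List Int := [3, -41, 7]

def Spec_lengthiest (lst : List Int) (out : Int × Int) : Prop := out = lengthiest_alt lst
instance (lst : List Int) (out : Int × Int) : Decidable (Spec_lengthiest lst out) := by unfold Spec_lengthiest; infer_instance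

-- ===== CLAIM (what is proved, stated in full; the proofs are below) =====
def Claim_equal_lengthiest : Prop := ∀ (lst : List Int), Dom_lengthiest lst → Pre_lengthiest lst → Spec_lengthiest lst (lengthiest lst)

-- ===== LEMMAS AND PROOFS =====

def pvF (x : Int) : Int := PySem.Str.len (PySem.Int.toStr x)
def pvStep (lst : List Int) (st : Int × Int) (i : Int) : Int × Int :=
  if pvF (PySem.List.pyGetD lst i 0) > st.1 then (pvF (PySem.List.pyGetD lst i 0), i) else st

theorem pv_loop_inv (lst : List Int) (x0 : Int) (hx0 : lst.getD 0 0 = x0) (hne : lst ≠ [])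
    (j : Nat) (h1 : 1 ≤ j) (hj : j ≤ lst.length) :
    (PySem.List.pyRange 0 j 1).foldl (pvStep lst) (pvF x0, 0)
      = ((((lst.map pvF).take j).foldl max (pvF x0)),
         ((PySem.List.index? ((lst.map pvF).take j)
              (((lst.map pvF).take j).foldl max (pvF x0))).getD 0 : Int)) := by
  induction j, h1 using Nat.le_induction with
  | base =>
    have : PySem.List.pyRange 0 ((1:Nat):Int) 1 = [0] := by
      simpa using PySem.List.pyRange_one_singleton (a := 0)
    rw [this]
    obtain ⟨h, t, rfl⟩ := List.exists_cons_of_ne_nil hne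
    simp [pvStep, PySem.List.pyGetD_zero] at hx0 ⊢
    subst hx0
    simp
  | succ j h1 ih =>
    have hjlt : j < lst.length := by omega
    have hrange : PySem.List.pyRange 0 ((j+1:Nat):Int) 1 = PySem.List.pyRange 0 j 1 ++ [(j:Int)] := by
      push_cast
      exact PySem.List.pyRange_one_succ_right (by positivity)
    rw [hrange, List.foldl_append, ih (by omega)]
    set L := lst.map pvF with hL
    have hLlen : L.length = lst.length := by simp [hL]
    have hjL : j < L.length := by omega
    have htake : L.take (j+1) = L.take j ++ [L[j]] := by
      rw [List.take_add_one]; simp [List.getElem?_eq_getElem hjL]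
    have hget : pvF (PySem.List.pyGetD lst (j : Int) 0) = L[j] := by
      rw [PySem.List.pyGetD_natCast, List.getD_eq_getElem _ _ hjlt]
      simp [hL]
    have hmem0 : pvF x0 ∈ L.take j := by
      have h0 : L[0]'(by omega) = pvF x0 := by
        subst hx0
        simp [hL]
        congr 1
        exact (List.getD_eq_getElem _ _ _).symm
      have : L[0]'(by omega) ∈ L.take j := by
        rw [List.mem_take_iff_getElem]
        exact ⟨0, by omega, rfl⟩
      rwa [h0] at this
    set M := (L.take j).foldl max (pvF x0) with hM
    have hMmem : M ∈ L.take j := by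
      rcases (PySem.List.foldl_max_mem (L.take j) (pvF x0)) with h | h
      · rw [hM, h]; exact hmem0
      · exact h
    rw [htake]
    by_cases hc : L[j] > M
    · have hnot : L[j] ∉ L.take j := by
        intro hmemj
        have := (PySem.List.le_foldl_max (L.take j) (pvF x0)).2 _ hmemj
        omega
      have hfold : (L.take j ++ [L[j]]).foldl max (pvF x0) = L[j] := by
        rw [List.foldl_append]
        simp [← hM]
        omega
      rw [hfold]
      have hidx : PySem.List.index? (L.take j ++ [L[j]]) L[j] = some (L.take j).length :=
        PySem.List.index?_append_singleton_self (l := L.take j) (c := L[j]) hnot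
      rw [hidx]
      simp only [List.foldl_cons, List.foldl_nil, pvStep]
      rw [hget, if_pos hc]
      simp [List.length_take, Nat.min_eq_left (by omega : j ≤ L.length)]
    · have hfold : (L.take j ++ [L[j]]).foldl max (pvF x0) = M := by
        rw [List.foldl_append]
        simp [← hM]
        omega
      rw [hfold]
      have hidx : PySem.List.index? (L.take j ++ [L[j]]) M = PySem.List.index? (L.take j) M := by
        exact PySem.List.index?_append_of_mem _ hMmem
      rw [hidx]
      simp only [List.foldl_cons, List.foldl_nil, pvStep]
      rw [hget, if_neg hc]

theorem pv_main (lst : List Int) (hpre : lst ≠ []) :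
    lengthiest lst = lengthiest_alt lst := by
  obtain ⟨h, t, rfl⟩ := List.exists_cons_of_ne_nil hpre
  have hstep : (fun (st : Int × Int) i =>
          if PySem.Str.len (PySem.Int.toStr (PySem.List.pyGetD (h :: t) i 0)) > st.1 then
            (PySem.Str.len (PySem.Int.toStr (PySem.List.pyGetD (h :: t) i 0)), i)
          else st) = pvStep (h :: t) := rfl
  have hget0 : PySem.List.pyGet? (h :: t) 0 = some h := by
    simp [PySem.List.pyGet?, PySem.List.pyIdx?]
  have hinv := pv_loop_inv (h :: t) h (by simp) (by simp) (h :: t).length (by simp) le_rfl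
  have htake : ((h :: t).map pvF).take (h :: t).length = (h :: t).map pvF := by
    simp
  rw [htake] at hinv
  set L := (h :: t).map pvF with hL
  set M := L.foldl max (pvF h) with hM
  have hmax : PySem.List.max? L (fun y => y) = some M := by
    rw [hL]
    simp only [List.map_cons]
    rw [PySem.List.max?_id_cons]
    congr 1
    rw [hM, hL]
    simp [max_self]
  have hMmem : M ∈ L := by
    rcases PySem.List.foldl_max_mem L (pvF h) with h' | h'
    · rw [hM, h', hL]; simp [pvF]
    · exact h'
  obtain ⟨k, hk⟩ : ∃ k, PySem.List.index? L M = some k := by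
    have := PySem.List.index?_isSome_iff (xs := L) (v := M)
    rcases hi : PySem.List.index? L M with _ | k
    · rw [hi] at this; simp at this; exact absurd hMmem this
    · exact ⟨k, rfl⟩
  simp only [lengthiest, lengthiest_alt, hget0, hstep,
    show (fun x => PySem.Str.len (PySem.Int.toStr x)) = pvF from rfl,
    show PySem.Str.len (PySem.Int.toStr h) = pvF h from rfl]
  rw [hinv]
  simp only [← hL, hmax, hk]
  simp

-- ===== VERDICT (by name: the statement is the Claim_ definition above) =====
theorem lengthiest_spec : Claim_equal_lengthiest := by
  intro lst _ hpre
  exact pv_main lst hpre
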